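-- pv_equiv track=rewrite | github.com/Aiden125/algo_py | simulation/A14719.py | getTotalSum
-- ===== SOURCE A (Python) =====
-- def getTotalSum(arr):
--     left_index = 0
--     right_index = 1
--
--     min_v = 0
--     total = 0
--     sum_list = []
--     while right_index < len(arr):
--         left = arr[left_index]
--         right = arr[right_index]
--
--         if (left <= right) or (right_index == len(arr) - 1):
--             min_v = min(left, right)
--             for i in sum_list:
--                 total += min_v - i
--             sum_list = []
--             left_index = right_index
--             right_index += 1
--         elif left > right:
--             sum_list.append(arr[right_index])
--             right_index += 1
--     return total
-- ===== SOURCE B (Python) =====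
-- def getTotalSum(arr):
--     n = len(arr)
--     if n <= 1:
--         return 0
--     # stage 1: wall positions = running-maximum positions; the last index is forced
--     walls = [0]
--     best = arr[0]
--     for i in range(1, n):
--         if arr[i] >= best:
--             walls.append(i)
--             best = arr[i]
--     if walls[-1] != n - 1:
--         walls.append(n - 1)
--     # stage 2: each dip between consecutive walls fills to the lower wall
--     return sum(min(arr[a], arr[b]) - arr[j]
--                for a, b in zip(walls, walls[1:])
--                for j in range(a + 1, b))
-- ===== Notes on version B (the rewrite author's own statement) =====
-- stated objective: alternative
-- what changed: Replaces A's online buffer-and-flush two-pointer pass by two staged passes: stage 1 collects the 'wall' indices, which are exactly the running-maximum positions (plus the forced last index), and stage 2 sums min(arr[a],arr[b])-arr[j] over each dip j between consecutive walls a,b via zip and index ranges.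
import Mathlib
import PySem

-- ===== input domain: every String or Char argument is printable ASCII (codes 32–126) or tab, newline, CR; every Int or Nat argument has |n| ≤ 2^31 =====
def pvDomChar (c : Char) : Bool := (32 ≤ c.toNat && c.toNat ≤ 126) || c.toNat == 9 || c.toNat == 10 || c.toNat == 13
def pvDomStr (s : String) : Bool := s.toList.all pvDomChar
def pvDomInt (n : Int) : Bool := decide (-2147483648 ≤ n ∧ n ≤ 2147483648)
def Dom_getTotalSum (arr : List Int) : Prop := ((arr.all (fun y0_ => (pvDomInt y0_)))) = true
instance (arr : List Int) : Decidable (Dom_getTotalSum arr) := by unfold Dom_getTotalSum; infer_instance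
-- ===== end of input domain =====

-- B replaces A's online buffer-and-flush pass by two staged passes: collect the running-maximum
-- "wall" positions (plus the forced last index), then sum the fill level over each inter-wall dip.


-- ===== PORT A =====
-- while-loop of A as recursion on right_index; both indices are nonnegative counters
-- provably in range when read, so List.getD is exact for Python's arr[i] here.
def getTotalSumLoop (arr : List Int) (leftIndex rightIndex : Nat) (total : Int) (sumList : List Int) : Int :=
  if _h : rightIndex < arr.length then
    let left := arr.getD leftIndex 0
    let right := arr.getD rightIndex 0
    if left ≤ right ∨ rightIndex = arr.length - 1 then
      -- min_v := min left right; for i in sum_list: total += min_v - i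
      getTotalSumLoop arr rightIndex (rightIndex + 1)
        (sumList.foldl (fun t i => t + (min left right - i)) total) []
    else
      -- elif left > right (always true here): buffer arr[right_index]
      getTotalSumLoop arr leftIndex (rightIndex + 1) total (sumList ++ [right])
  else
    total
termination_by arr.length - rightIndex
decreasing_by all_goals omega

def getTotalSum (arr : List Int) : Int :=
  getTotalSumLoop arr 0 1 0 []

-- ===== PORT B =====
-- stage 1 of Source B: for i in range(1, n): if arr[i] >= best: walls.append(i); best = arr[i]
def wallsLoopB (arr : List Int) (i n : Nat) (walls : List Nat) (best : Int) : List Nat :=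
  if _h : i < n then
    if best ≤ arr.getD i 0 then wallsLoopB arr (i + 1) n (walls ++ [i]) (arr.getD i 0)
    else wallsLoopB arr (i + 1) n walls best
  else walls
termination_by n - i
decreasing_by all_goals omega

-- stage 2 of Source B: sum(min(arr[a],arr[b]) - arr[j] for a,b in zip(walls, walls[1:]) for j in range(a+1,b))
def getTotalSum_alt (arr : List Int) : Int :=
  if arr.length ≤ 1 then 0
  else
    let w := wallsLoopB arr 1 arr.length [0] (arr.getD 0 0)
    let walls := if w.getLast? ≠ some (arr.length - 1) then w ++ [arr.length - 1] else w
    ((walls.zip walls.tail).map (fun p =>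
      ((List.range' (p.1 + 1) (p.2 - p.1 - 1)).map
        (fun j => min (arr.getD p.1 0) (arr.getD p.2 0) - arr.getD j 0)).sum)).sum

-- ===== PRECONDITION & SPEC =====
def Spec_getTotalSum (arr : List Int) (out : Int) : Prop := out = getTotalSum_alt arr
instance (arr : List Int) (out : Int) : Decidable (Spec_getTotalSum arr out) := by unfold Spec_getTotalSum; infer_instance

-- ===== CLAIM (what is proved, stated in full; the proofs are below) =====
def Claim_equal_getTotalSum : Prop := ∀ (arr : List Int), Dom_getTotalSum arr → Spec_getTotalSum arr (getTotalSum arr)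

-- ===== LEMMAS AND PROOFS =====

-- fill contribution of the dip strictly between walls a and b
def contrib (arr : List Int) (a b : Nat) : Int :=
  ((List.range' (a + 1) (b - a - 1)).map
    (fun j => min (arr.getD a 0) (arr.getD b 0) - arr.getD j 0)).sum

-- common characterisation: remaining total of A's process from wall li, scanning at ri
def tailSum (arr : List Int) (li ri : Nat) : Int :=
  if _h : ri < arr.length then
    if arr.getD li 0 ≤ arr.getD ri 0 ∨ ri = arr.length - 1 then
      contrib arr li ri + tailSum arr ri (ri + 1)
    else tailSum arr li (ri + 1)
  else 0
termination_by arr.length - ri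
decreasing_by all_goals omega

-- sum over consecutive pairs of a wall list
def zsum (arr : List Int) : List Nat → Int
  | [] => 0
  | [_] => 0
  | a :: b :: l => contrib arr a b + zsum arr (b :: l)

lemma flush_fold (l : List Int) (m : Int) : ∀ t : Int,
    l.foldl (fun t i => t + (m - i)) t = t + m * l.length - l.sum := by
  induction l with
  | nil => intro t; simp
  | cons x xs ih =>
      intro t
      simp [List.foldl, ih, List.sum_cons]
      ring

lemma contrib_eq (arr : List Int) (a b : Nat) :
    contrib arr a b =
      min (arr.getD a 0) (arr.getD b 0) * ((List.range' (a + 1) (b - a - 1)).map (fun j => arr.getD j 0)).length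
        - ((List.range' (a + 1) (b - a - 1)).map (fun j => arr.getD j 0)).sum := by
  unfold contrib
  generalize List.range' (a + 1) (b - a - 1) = l
  generalize min (arr.getD a 0) (arr.getD b 0) = m
  induction l with
  | nil => simp
  | cons x xs ih =>
      simp only [List.map_cons, List.sum_cons, List.length_cons, ih]
      push_cast
      ring

-- A's loop computes total + tailSum, given the buffer is exactly the dips arr[li+1..ri-1]
lemma loopA_eq (arr : List Int) : ∀ (k li ri : Nat) (total : Int),
    arr.length - ri ≤ k → li < ri →
    getTotalSumLoop arr li ri total ((List.range' (li + 1) (ri - li - 1)).map (fun j => arr.getD j 0))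
      = total + tailSum arr li ri := by
  intro k
  induction k with
  | zero =>
      intro li ri total hk _
      rw [getTotalSumLoop, tailSum]
      rw [dif_neg (by omega : ¬ ri < arr.length), dif_neg (by omega : ¬ ri < arr.length)]
      simp
  | succ k ih =>
      intro li ri total hk hlr
      rw [getTotalSumLoop, tailSum]
      by_cases h : ri < arr.length
      · simp only [dif_pos h]
        by_cases hc : arr.getD li 0 ≤ arr.getD ri 0 ∨ ri = arr.length - 1
        · simp only [if_pos hc]
          rw [flush_fold]
          have h0 : (List.range' (ri + 1) (ri + 1 - ri - 1)).map (fun j => arr.getD j 0) = [] := by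
            simp
          rw [← h0, ih ri (ri + 1) _ (by omega) (by omega)]
          rw [contrib_eq]
          ring
        · simp only [if_neg hc]
          have hr : List.range' (li + 1) (ri + 1 - li - 1) =
              List.range' (li + 1) (ri - li - 1) ++ [ri] := by
            have : ri + 1 - li - 1 = (ri - li - 1) + 1 := by omega
            rw [this, List.range'_1_concat]
            congr 2
            omega
          have := ih li (ri + 1) total (by omega) (by omega)
          rw [hr] at this
          simpa using this
      · simp only [dif_neg h]
        simp

-- the indices wallsLoopB appends depend only on (arr, i, n, best)
def wallsSuffix (arr : List Int) (i n : Nat) (best : Int) : List Nat :=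
  if _h : i < n then
    if best ≤ arr.getD i 0 then i :: wallsSuffix arr (i + 1) n (arr.getD i 0)
    else wallsSuffix arr (i + 1) n best
  else []
termination_by n - i
decreasing_by all_goals omega

lemma wallsLoopB_eq (arr : List Int) (n : Nat) : ∀ (k i : Nat) (w : List Nat) (best : Int),
    n - i ≤ k → wallsLoopB arr i n w best = w ++ wallsSuffix arr i n best := by
  intro k
  induction k with
  | zero =>
      intro i w best hk
      rw [wallsLoopB, wallsSuffix]
      rw [dif_neg (by omega : ¬ i < n), dif_neg (by omega : ¬ i < n)]
      simp
  | succ k ih =>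
      intro i w best hk
      rw [wallsLoopB, wallsSuffix]
      by_cases h : i < n
      · simp only [dif_pos h]
        by_cases hc : best ≤ arr.getD i 0
        · simp only [if_pos hc]
          rw [ih (i + 1) (w ++ [i]) _ (by omega)]
          simp
        · simp only [if_neg hc]
          exact ih (i + 1) w best (by omega)
      · simp only [dif_neg h]
        simp

-- finalisation of Source B: append the forced last wall unless already last
def finW (n : Nat) (l : List Nat) : List Nat :=
  if l.getLast? ≠ some (n - 1) then l ++ [n - 1] else l

lemma zsum_zip (arr : List Int) : ∀ (l : List Nat),
    ((l.zip l.tail).map (fun p =>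
      ((List.range' (p.1 + 1) (p.2 - p.1 - 1)).map
        (fun j => min (arr.getD p.1 0) (arr.getD p.2 0) - arr.getD j 0)).sum)).sum = zsum arr l := by
  intro l
  induction l with
  | nil => simp [zsum]
  | cons a t ih =>
      cases t with
      | nil => simp [zsum]
      | cons b t' =>
          simp only [List.tail_cons, List.zip_cons_cons, List.map_cons, List.sum_cons]
          rw [show zsum arr (a :: b :: t') = contrib arr a b + zsum arr (b :: t') from rfl]
          have : ((b :: t').zip t').map (fun p =>
              ((List.range' (p.1 + 1) (p.2 - p.1 - 1)).map
                (fun j => min (arr.getD p.1 0) (arr.getD p.2 0) - arr.getD j 0)).sum) =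
              (((b :: t').zip ((b :: t').tail)).map (fun p =>
              ((List.range' (p.1 + 1) (p.2 - p.1 - 1)).map
                (fun j => min (arr.getD p.1 0) (arr.getD p.2 0) - arr.getD j 0)).sum)) := rfl
          rw [this, ih]
          rfl

lemma finW_cons (n : Nat) (a b : Nat) (l : List Nat) :
    finW n (a :: b :: l) = a :: finW n (b :: l) := by
  unfold finW
  have : (a :: b :: l).getLast? = (b :: l).getLast? := by
    simp [List.getLast?_cons_cons]
  rw [this]
  split_ifs <;> simp

lemma zsum_cons_cons (arr : List Int) (a b : Nat) (l : List Nat) :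
    zsum arr (a :: b :: l) = contrib arr a b + zsum arr (b :: l) := rfl

lemma zsum_cons_finW (arr : List Int) (n a b : Nat) (l : List Nat) :
    zsum arr (a :: finW n (b :: l)) = contrib arr a b + zsum arr (finW n (b :: l)) := by
  unfold finW
  split_ifs
  · rw [List.cons_append, zsum_cons_cons]
  · rw [zsum_cons_cons]

-- key invariant: from wall lw with scan at i (all of (lw,i) dipping), the finalized
-- suffix walls carry exactly the remaining total of A's process
lemma key (arr : List Int) : ∀ (k lw i : Nat),
    arr.length - i ≤ k → lw < i → i < arr.length →
    (∀ j, lw < j → j < i → arr.getD j 0 < arr.getD lw 0) →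
    zsum arr (finW arr.length (lw :: wallsSuffix arr i arr.length (arr.getD lw 0)))
      = tailSum arr lw i := by
  intro k
  induction k with
  | zero => intro lw i hk _ hi _; omega
  | succ k ih =>
      intro lw i hk hlw hi hdip
      rw [wallsSuffix, tailSum]
      simp only [dif_pos hi]
      by_cases hc : arr.getD lw 0 ≤ arr.getD i 0
      · simp only [if_pos hc, if_pos (Or.inl hc)]
        by_cases hlast : i = arr.length - 1
        · -- next wall is the last index; the suffix scan ends and finW keeps the list
          have hsuf : wallsSuffix arr (i + 1) arr.length (arr.getD i 0) = [] := by
            rw [wallsSuffix]; rw [dif_neg (by omega)]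
          rw [hsuf, finW_cons]
          have hfin : finW arr.length [i] = [i] := by
            unfold finW
            simp [hlast]
          rw [hfin, zsum_cons_cons]
          have ht : tailSum arr i (i + 1) = 0 := by
            rw [tailSum]; rw [dif_neg (by omega)]
          rw [ht]
          simp [zsum]
        · rw [finW_cons, zsum_cons_finW]
          rw [ih i (i + 1) (by omega) (by omega) (by omega) (by intro j h1 h2; omega)]
      · simp only [if_neg hc]
        by_cases hlast : i = arr.length - 1
        · -- last index dips: suffix ends empty, finW appends the forced wall n-1
          simp only [if_pos (Or.inr hlast)]
          have hsuf : wallsSuffix arr (i + 1) arr.length (arr.getD lw 0) = [] := by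
            rw [wallsSuffix]; rw [dif_neg (by omega)]
          rw [hsuf]
          have hfin : finW arr.length [lw] = [lw, arr.length - 1] := by
            unfold finW
            simp [show lw ≠ arr.length - 1 by omega]
          rw [hfin, zsum_cons_cons]
          have ht : tailSum arr i (i + 1) = 0 := by
            rw [tailSum]; rw [dif_neg (by omega)]
          rw [ht, ← hlast]
          simp [zsum]
        · have hor : ¬ (arr.getD lw 0 ≤ arr.getD i 0 ∨ i = arr.length - 1) :=
            not_or.mpr ⟨hc, hlast⟩
          simp only [if_neg hor]
          exact ih lw (i + 1) (by omega) (by omega) (by omega)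
            (by intro j h1 h2
                by_cases hj : j = i
                · subst hj; omega
                · exact hdip j h1 (by omega))

-- ===== VERDICT (by name: the statement is the Claim_ definition above) =====
theorem getTotalSum_spec : Claim_equal_getTotalSum := by
  intro arr _
  unfold Spec_getTotalSum getTotalSum getTotalSum_alt
  by_cases h : arr.length ≤ 1
  · rw [if_pos h, getTotalSumLoop]
    rw [dif_neg (by omega : ¬ 1 < arr.length)]
  · rw [if_neg h]
    have hA : getTotalSumLoop arr 0 1 0 [] = 0 + tailSum arr 0 1 := by
      have h0 : (List.range' (0 + 1) (1 - 0 - 1)).map (fun j => arr.getD j 0) = [] := by simp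
      rw [← h0]
      exact loopA_eq arr arr.length 0 1 0 (by omega) (by omega)
    rw [hA]
    rw [wallsLoopB_eq arr arr.length arr.length 1 [0] (arr.getD 0 0) (by omega)]
    simp only [List.singleton_append]
    rw [zsum_zip]
    rw [show (if (0 :: wallsSuffix arr 1 arr.length (arr.getD 0 0)).getLast? ≠ some (arr.length - 1)
          then (0 :: wallsSuffix arr 1 arr.length (arr.getD 0 0)) ++ [arr.length - 1]
          else 0 :: wallsSuffix arr 1 arr.length (arr.getD 0 0))
        = finW arr.length (0 :: wallsSuffix arr 1 arr.length (arr.getD 0 0)) from rfl]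
    rw [key arr arr.length 0 1 (by omega) (by omega) (by omega) (by intro j h1 h2; omega)]
    simp
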